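-- pv_equiv track=rewrite | github.com/tayschrenn/npuzzle | src/core.py | getFinalCoords
-- ===== SOURCE A (Python) =====
-- def getFinalCoords(puzzle_size):
-- 	x = 0
-- 	y = 0
-- 	lim = 0
-- 	ret = {}
-- 	count = 1
-- 	while True:
-- 		while x + 1 < puzzle_size - lim:
-- 			ret[count] = [y,x]
-- 			count += 1
-- 			x += 1
-- 		while y + 1< puzzle_size - lim:
-- 			ret[count] = [y,x]
-- 			count += 1
-- 			y += 1
-- 		while x - 1>= 0 + lim:
-- 			ret[count] = [y,x]
-- 			count += 1
-- 			x -= 1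
-- 		while y - 1 >= 0 + lim:
-- 			ret[count] = [y,x]
-- 			count += 1
-- 			y -= 1
-- 		x += 1
-- 		y += 1
-- 		lim += 1
-- 		if x >= puzzle_size - lim and y >= puzzle_size - lim:
-- 			break
-- 	try:
-- 		del ret[puzzle_size * puzzle_size]
-- 	except:
-- 		pass
-- 	return ret
-- ===== SOURCE B (Python) =====
-- def getFinalCoords(puzzle_size):
--     n = puzzle_size
--     if n <= 1:
--         return {}
--     r, c = 0, 0
--     dr, dc = 0, 1
--     top, bottom, left, right = 0, n - 1, 0, n - 1
--     ret = {}
--     for k in range(1, n * n):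
--         ret[k] = [r, c]
--         nr, nc = r + dr, c + dc
--         if not (top <= nr <= bottom and left <= nc <= right):
--             if dc == 1:
--                 top += 1
--                 dr, dc = 1, 0
--             elif dr == 1:
--                 right -= 1
--                 dr, dc = 0, -1
--             elif dc == -1:
--                 bottom -= 1
--                 dr, dc = -1, 0
--             else:
--                 left += 1
--                 dr, dc = 0, 1
--         r, c = r + dr, c + dc
--     return ret
-- ===== Notes on version B (the rewrite author's own statement) =====
-- stated objective: alternative
-- what changed: Replaces A's four-while-loops-per-ring plus final try/except delete with a single-step direction-vector state machine: one loop over the exact key range 1..n*n-1 that writes one cell per iteration, turning right (right->down->left->up) and shrinking the top/bottom/left/right bounds whenever the next cell would leave them, so no layer arithmetic and no deletion is ever needed.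
import Mathlib
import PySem

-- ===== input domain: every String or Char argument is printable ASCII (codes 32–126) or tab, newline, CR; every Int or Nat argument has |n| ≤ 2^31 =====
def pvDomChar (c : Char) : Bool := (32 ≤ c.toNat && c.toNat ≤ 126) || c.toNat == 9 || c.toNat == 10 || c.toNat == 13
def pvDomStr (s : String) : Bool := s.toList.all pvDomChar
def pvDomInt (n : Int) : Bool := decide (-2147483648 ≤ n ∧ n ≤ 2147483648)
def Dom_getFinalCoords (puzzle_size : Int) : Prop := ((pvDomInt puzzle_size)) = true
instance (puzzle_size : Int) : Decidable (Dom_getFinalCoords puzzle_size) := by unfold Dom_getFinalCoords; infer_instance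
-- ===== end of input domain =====

-- B replaces A's four-while-loops-per-ring walk plus try/except delete by a single-step
-- direction-vector state machine over the exact key range 1..n*n-1 (turn right and shrink a
-- bound when the next cell would leave the bounds); same cost, genuinely different control.

-- ===== PORT A =====
-- while x + 1 < n - lim: ret[count] = [y,x]; count += 1; x += 1
def pvWhileR (n lim : Int) (ret : PySem.Dict Int (List Int)) (count x y : Int) :
    PySem.Dict Int (List Int) × Int × Int :=
  if _h : x + 1 < n - lim then
    pvWhileR n lim (ret.insert count [y, x]) (count + 1) (x + 1) y
  else (ret, count, x)
termination_by (n - lim - x).toNat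
decreasing_by omega

-- while y + 1 < n - lim: ret[count] = [y,x]; count += 1; y += 1
def pvWhileD (n lim : Int) (ret : PySem.Dict Int (List Int)) (count x y : Int) :
    PySem.Dict Int (List Int) × Int × Int :=
  if _h : y + 1 < n - lim then
    pvWhileD n lim (ret.insert count [y, x]) (count + 1) x (y + 1)
  else (ret, count, y)
termination_by (n - lim - y).toNat
decreasing_by omega

-- while x - 1 >= 0 + lim: ret[count] = [y,x]; count += 1; x -= 1
def pvWhileL (n lim : Int) (ret : PySem.Dict Int (List Int)) (count x y : Int) :
    PySem.Dict Int (List Int) × Int × Int :=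
  if _h : x - 1 ≥ 0 + lim then
    pvWhileL n lim (ret.insert count [y, x]) (count + 1) (x - 1) y
  else (ret, count, x)
termination_by (x - lim).toNat
decreasing_by omega

-- while y - 1 >= 0 + lim: ret[count] = [y,x]; count += 1; y -= 1
def pvWhileU (n lim : Int) (ret : PySem.Dict Int (List Int)) (count x y : Int) :
    PySem.Dict Int (List Int) × Int × Int :=
  if _h : y - 1 ≥ 0 + lim then
    pvWhileU n lim (ret.insert count [y, x]) (count + 1) x (y - 1)
  else (ret, count, y)
termination_by (y - lim).toNat
decreasing_by omega

-- the outer 'while True' loop; fuel is only a totality guard (proved sufficient below)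
def pvOuter (n : Int) (fuel : Nat) (x y lim count : Int) (ret : PySem.Dict Int (List Int)) :
    PySem.Dict Int (List Int) :=
  match fuel with
  | 0 => ret
  | fuel + 1 =>
    let r1 := pvWhileR n lim ret count x y
    let r2 := pvWhileD n lim r1.1 r1.2.1 r1.2.2 y
    let r3 := pvWhileL n lim r2.1 r2.2.1 r1.2.2 r2.2.2
    let r4 := pvWhileU n lim r3.1 r3.2.1 r3.2.2 r2.2.2
    let x' := r3.2.2 + 1
    let y' := r4.2.2 + 1
    let lim' := lim + 1
    if x' ≥ n - lim' ∧ y' ≥ n - lim' then r4.1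
    else pvOuter n fuel x' y' lim' r4.2.1 r4.1

def getFinalCoords (puzzle_size : Int) : List (Int × List Int) :=
  ((pvOuter puzzle_size (puzzle_size.toNat + 1) 0 0 0 1 PySem.Dict.empty).erase
    (puzzle_size * puzzle_size)).items   -- try: del ret[n*n] except: pass

-- ===== PORT B =====
-- the walk state: dict so far, position (r,c), direction (dr,dc), current bounds
structure PvBSt where
  ret : PySem.Dict Int (List Int)
  r : Int
  c : Int
  dr : Int
  dc : Int
  top : Int
  bottom : Int
  left : Int
  right : Int

-- one iteration of B's loop body: write ret[k]=[r,c]; turn right and shrink a bound if the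
-- next cell would leave the bounds; then step
def pvBStep (st : PvBSt) (k : Int) : PvBSt :=
  let ret := st.ret.insert k [st.r, st.c]
  if ¬(st.top ≤ st.r + st.dr ∧ st.r + st.dr ≤ st.bottom ∧
        st.left ≤ st.c + st.dc ∧ st.c + st.dc ≤ st.right) then
    if st.dc = 1 then ⟨ret, st.r + 1, st.c, 1, 0, st.top + 1, st.bottom, st.left, st.right⟩
    else if st.dr = 1 then ⟨ret, st.r, st.c - 1, 0, -1, st.top, st.bottom, st.left, st.right - 1⟩
    else if st.dc = -1 then ⟨ret, st.r - 1, st.c, -1, 0, st.top, st.bottom - 1, st.left, st.right⟩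
    else ⟨ret, st.r, st.c + 1, 0, 1, st.top, st.bottom, st.left + 1, st.right⟩
  else ⟨ret, st.r + st.dr, st.c + st.dc, st.dr, st.dc, st.top, st.bottom, st.left, st.right⟩

def getFinalCoords_alt (puzzle_size : Int) : List (Int × List Int) :=
  if puzzle_size ≤ 1 then (PySem.Dict.empty : PySem.Dict Int (List Int)).items
  else
    ((PySem.List.pyRange 1 (puzzle_size * puzzle_size) 1).foldl pvBStep
      ⟨PySem.Dict.empty, 0, 0, 0, 1, 0, puzzle_size - 1, 0, puzzle_size - 1⟩).ret.items

-- ===== PRECONDITION & SPEC =====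
def Spec_getFinalCoords (puzzle_size : Int) (out : List (Int × List Int)) : Prop := out = getFinalCoords_alt puzzle_size
instance (puzzle_size : Int) (out : List (Int × List Int)) : Decidable (Spec_getFinalCoords puzzle_size out) := by unfold Spec_getFinalCoords; infer_instance

-- ===== CLAIM (what is proved, stated in full; the proofs are below) =====
def Claim_equal_getFinalCoords : Prop := ∀ (puzzle_size : Int), Dom_getFinalCoords puzzle_size → Spec_getFinalCoords puzzle_size (getFinalCoords puzzle_size)

-- ===== LEMMAS AND PROOFS =====

-- one ring of the spiral, as A generates it
def pvRing (n lim : Int) : List (List Int) :=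
  (PySem.List.pyRange lim (n - 1 - lim) 1).map (fun c => [lim, c])
    ++ (PySem.List.pyRange lim (n - 1 - lim) 1).map (fun r => [r, n - 1 - lim])
    ++ (PySem.List.pyRange (n - 1 - lim) lim (-1)).map (fun c => [n - 1 - lim, c])
    ++ (PySem.List.pyRange (n - 1 - lim) lim (-1)).map (fun r => [r, lim])

-- successive insertions with consecutive fresh keys
def pvInsertSeq (ret : PySem.Dict Int (List Int)) (count : Int) :
    List (List Int) → PySem.Dict Int (List Int)
  | [] => ret
  | v :: vs => pvInsertSeq (ret.insert count v) (count + 1) vs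

theorem pvInsertSeq_append (ret : PySem.Dict Int (List Int)) (c : Int)
    (vs ws : List (List Int)) :
    pvInsertSeq ret c (vs ++ ws) = pvInsertSeq (pvInsertSeq ret c vs) (c + vs.length) ws := by
  induction vs generalizing ret c with
  | nil => simp [pvInsertSeq]
  | cons v vs ih => simp [pvInsertSeq, ih]; ring_nf

theorem pvInsertSeq_items (ret : PySem.Dict Int (List Int)) (c : Int)
    (vs : List (List Int)) (h : ∀ k ∈ ret.keys, k < c) :
    (pvInsertSeq ret c vs).items = ret.items ++ PySem.List.enumerate vs c ∧
    (∀ k ∈ (pvInsertSeq ret c vs).keys, k < c + vs.length) := by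
  induction vs generalizing ret c with
  | nil => simpa [pvInsertSeq, PySem.List.enumerate] using h
  | cons v vs ih =>
    have hc : ret.contains c = false := by
      cases hcon : ret.contains c
      · rfl
      · exact absurd (h c ((PySem.Dict.contains_iff_mem_keys ret c).mp hcon)) (lt_irrefl c)
    have hkeys : ∀ k ∈ (ret.insert c v).keys, k < c + 1 := by
      intro k hk
      rcases (PySem.Dict.mem_keys_insert ret c k v).mp hk with h1 | h2
      · omega
      · have := h k h2; omega
    have := ih (ret.insert c v) (c + 1) hkeys
    refine ⟨?_, ?_⟩
    · simp only [pvInsertSeq]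
      rw [this.1, PySem.Dict.items_insert_of_not_contains ret v hc, PySem.List.enumerate_cons]
      simp
    · intro k hk
      have := this.2 k (by simpa [pvInsertSeq] using hk)
      simp only [List.length_cons]
      omega

theorem pvWhileR_spec (n lim : Int) (ret : PySem.Dict Int (List Int)) (c x y : Int)
    (h : x ≤ n - 1 - lim) :
    pvWhileR n lim ret c x y =
      (pvInsertSeq ret c ((PySem.List.pyRange x (n - 1 - lim) 1).map (fun t => [y, t])),
       c + (n - 1 - lim - x), n - 1 - lim) := by
  generalize hm : (n - 1 - lim - x).toNat = m
  induction m generalizing ret c x with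
  | zero =>
    have hx : x = n - 1 - lim := by omega
    rw [pvWhileR]
    simp [hx, PySem.List.pyRange_one_eq_nil (by omega : n - 1 - lim ≤ n - 1 - lim), pvInsertSeq]
    omega
  | succ m ih =>
    have hlt : x + 1 < n - lim := by omega
    rw [pvWhileR, dif_pos hlt, ih _ _ _ (by omega) (by omega),
      PySem.List.pyRange_one_cons (by omega : x < n - 1 - lim)]
    simp [pvInsertSeq]
    omega

theorem pvWhileD_spec (n lim : Int) (ret : PySem.Dict Int (List Int)) (c x y : Int)
    (h : y ≤ n - 1 - lim) :
    pvWhileD n lim ret c x y =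
      (pvInsertSeq ret c ((PySem.List.pyRange y (n - 1 - lim) 1).map (fun t => [t, x])),
       c + (n - 1 - lim - y), n - 1 - lim) := by
  generalize hm : (n - 1 - lim - y).toNat = m
  induction m generalizing ret c y with
  | zero =>
    have hy : y = n - 1 - lim := by omega
    rw [pvWhileD]
    simp [hy, PySem.List.pyRange_one_eq_nil (by omega : n - 1 - lim ≤ n - 1 - lim), pvInsertSeq]
    omega
  | succ m ih =>
    have hlt : y + 1 < n - lim := by omega
    rw [pvWhileD, dif_pos hlt, ih _ _ _ (by omega) (by omega),
      PySem.List.pyRange_one_cons (by omega : y < n - 1 - lim)]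
    simp [pvInsertSeq]
    omega

theorem pvWhileL_spec (n lim : Int) (ret : PySem.Dict Int (List Int)) (c x y : Int)
    (h : lim ≤ x) :
    pvWhileL n lim ret c x y =
      (pvInsertSeq ret c ((PySem.List.pyRange x lim (-1)).map (fun t => [y, t])),
       c + (x - lim), lim) := by
  generalize hm : (x - lim).toNat = m
  induction m generalizing ret c x with
  | zero =>
    have hx : x = lim := by omega
    rw [pvWhileL]
    simp [hx, PySem.List.pyRange_neg_one_eq_nil (by omega : lim ≤ lim), pvInsertSeq]
  | succ m ih =>
    have hge : x - 1 ≥ 0 + lim := by omega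
    rw [pvWhileL, dif_pos hge, ih _ _ _ (by omega) (by omega),
      PySem.List.pyRange_neg_one_cons (by omega : lim < x)]
    simp [pvInsertSeq]
    omega

theorem pvWhileU_spec (n lim : Int) (ret : PySem.Dict Int (List Int)) (c x y : Int)
    (h : lim ≤ y) :
    pvWhileU n lim ret c x y =
      (pvInsertSeq ret c ((PySem.List.pyRange y lim (-1)).map (fun t => [t, x])),
       c + (y - lim), lim) := by
  generalize hm : (y - lim).toNat = m
  induction m generalizing ret c y with
  | zero =>
    have hy : y = lim := by omega
    rw [pvWhileU]
    simp [hy, PySem.List.pyRange_neg_one_eq_nil (by omega : lim ≤ lim), pvInsertSeq]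
  | succ m ih =>
    have hge : y - 1 ≥ 0 + lim := by omega
    rw [pvWhileU, dif_pos hge, ih _ _ _ (by omega) (by omega),
      PySem.List.pyRange_neg_one_cons (by omega : lim < y)]
    simp [pvInsertSeq]
    omega

theorem pvRing_empty (n lim : Int) (h : n - 1 ≤ 2 * lim) : pvRing n lim = [] := by
  unfold pvRing
  rw [PySem.List.pyRange_one_eq_nil (by omega), PySem.List.pyRange_neg_one_eq_nil (by omega)]
  simp

theorem pvTail_empty (n a m : Int) (h : n - 1 ≤ 2 * a) :
    (PySem.List.pyRange a m 1).flatMap (pvRing n) = [] := by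
  simp only [List.flatMap_eq_nil_iff]
  intro l hl
  have := PySem.List.mem_pyRange_one.mp hl
  exact pvRing_empty n l (by omega)

theorem pvOuter_spec (n : Int) (fuel : Nat) : ∀ (lim c : Int) (ret : PySem.Dict Int (List Int)),
    0 ≤ lim → 1 ≤ fuel → n ≤ 2 * lim + 2 * fuel →
    pvOuter n fuel lim lim lim c ret =
      pvInsertSeq ret c
        ((PySem.List.pyRange lim (PySem.Int.floordiv (n + 1) 2) 1).flatMap (pvRing n)) := by
  induction fuel with
  | zero => intro _ _ _ _ hf; omega
  | succ fuel ih =>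
    intro lim c ret hlim _ hfuel
    by_cases hdeg : n - 1 ≤ 2 * lim
    · -- degenerate: all four inner loops are no-ops and the loop breaks at once
      have e1 : pvWhileR n lim ret c lim lim = (ret, c, lim) := by
        rw [pvWhileR, dif_neg (by omega)]
      have e2 : pvWhileD n lim ret c lim lim = (ret, c, lim) := by
        rw [pvWhileD, dif_neg (by omega)]
      have e3 : pvWhileL n lim ret c lim lim = (ret, c, lim) := by
        rw [pvWhileL, dif_neg (by omega)]
      have e4 : pvWhileU n lim ret c lim lim = (ret, c, lim) := by
        rw [pvWhileU, dif_neg (by omega)]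
      rw [pvOuter, pvTail_empty n lim _ hdeg]
      simp only [e1, e2, e3, e4]
      rw [if_pos (by constructor <;> omega)]
      rfl
    · -- full ring at layer lim
      have hA : lim ≤ n - 1 - lim := by omega
      have h1 := pvWhileR_spec n lim ret c lim lim hA
      have h2 := pvWhileD_spec n lim
        (pvInsertSeq ret c ((PySem.List.pyRange lim (n - 1 - lim) 1).map (fun t => [lim, t])))
        (c + (n - 1 - lim - lim)) (n - 1 - lim) lim hA
      have h3 := pvWhileL_spec n lim
        (pvInsertSeq (pvInsertSeq ret c
            ((PySem.List.pyRange lim (n - 1 - lim) 1).map (fun t => [lim, t])))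
          (c + (n - 1 - lim - lim))
          ((PySem.List.pyRange lim (n - 1 - lim) 1).map (fun t => [t, n - 1 - lim])))
        (c + (n - 1 - lim - lim) + (n - 1 - lim - lim)) (n - 1 - lim) (n - 1 - lim) hA
      have h4 := pvWhileU_spec n lim
        (pvInsertSeq (pvInsertSeq (pvInsertSeq ret c
              ((PySem.List.pyRange lim (n - 1 - lim) 1).map (fun t => [lim, t])))
            (c + (n - 1 - lim - lim))
            ((PySem.List.pyRange lim (n - 1 - lim) 1).map (fun t => [t, n - 1 - lim])))
          (c + (n - 1 - lim - lim) + (n - 1 - lim - lim))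
          ((PySem.List.pyRange (n - 1 - lim) lim (-1)).map (fun t => [n - 1 - lim, t])))
        (c + (n - 1 - lim - lim) + (n - 1 - lim - lim) + (n - 1 - lim - lim))
        lim (n - 1 - lim) hA
      have hring : ∀ c' : Int,
          pvInsertSeq ret c' (pvRing n lim) =
          pvInsertSeq (pvInsertSeq (pvInsertSeq (pvInsertSeq ret c'
              ((PySem.List.pyRange lim (n - 1 - lim) 1).map (fun t => [lim, t])))
              (c' + (n - 1 - lim - lim))
              ((PySem.List.pyRange lim (n - 1 - lim) 1).map (fun t => [t, n - 1 - lim])))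
              (c' + (n - 1 - lim - lim) + (n - 1 - lim - lim))
              ((PySem.List.pyRange (n - 1 - lim) lim (-1)).map (fun t => [n - 1 - lim, t])))
              (c' + (n - 1 - lim - lim) + (n - 1 - lim - lim) + (n - 1 - lim - lim))
              ((PySem.List.pyRange (n - 1 - lim) lim (-1)).map (fun t => [t, lim])) := by
        intro c'
        have l1 : ((PySem.List.pyRange lim (n - 1 - lim) 1).length : Int) = n - 1 - lim - lim := by
          rw [PySem.List.length_pyRange_one]; omega
        have l2 : ((PySem.List.pyRange (n - 1 - lim) lim (-1)).length : Int) = n - 1 - lim - lim := by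
          rw [PySem.List.length_pyRange_neg_one]; omega
        unfold pvRing
        rw [pvInsertSeq_append, pvInsertSeq_append, pvInsertSeq_append]
        simp only [List.length_append, List.length_map]
        push_cast
        rw [l1, l2]
        congr 1 <;> try omega
        all_goals congr 1
        all_goals omega
      rw [pvOuter]
      simp only [h1, h2, h3, h4]
      by_cases hbr : n ≤ 2 * lim + 2
      · -- n = 2*lim + 2 : break, and this is the last nonempty ring
        have hn : n = 2 * lim + 2 := by omega
        have hm : PySem.Int.floordiv (n + 1) 2 = lim + 1 := by
          rw [PySem.Int.floordiv_eq_iff_of_pos (by omega)]; omega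
        rw [if_pos (by constructor <;> omega), hm,
          PySem.List.pyRange_one_cons (by omega : lim < lim + 1),
          PySem.List.pyRange_one_eq_nil (by omega : (lim + 1 : Int) ≤ lim + 1)]
        simp only [List.flatMap_cons, List.flatMap_nil, List.append_nil]
        rw [hring]
      · -- continue with layer lim + 1
        have hm : lim + 1 < PySem.Int.floordiv (n + 1) 2 := by
          have := (PySem.Int.le_floordiv_iff_mul_le (a := n + 1) (b := 2) (q := lim + 2)
            (by norm_num)).mpr (by omega)
          omega
        rw [if_neg (by omega), ih (lim + 1) _ _ (by omega) (by omega) (by omega),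
          PySem.List.pyRange_one_cons (by omega : lim < PySem.Int.floordiv (n + 1) 2),
          List.flatMap_cons, pvInsertSeq_append, hring]
        congr 1
        unfold pvRing
        simp only [List.length_append, List.length_map,
          PySem.List.length_pyRange_one, PySem.List.length_pyRange_neg_one]
        push_cast
        omega

-- pure geometric part of B's walk state (proof helper)
structure PvGSt where
  r : Int
  c : Int
  dr : Int
  dc : Int
  top : Int
  bottom : Int
  left : Int
  right : Int

def pvStepGeo (g : PvGSt) : PvGSt :=
  if ¬(g.top ≤ g.r + g.dr ∧ g.r + g.dr ≤ g.bottom ∧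
        g.left ≤ g.c + g.dc ∧ g.c + g.dc ≤ g.right) then
    if g.dc = 1 then ⟨g.r + 1, g.c, 1, 0, g.top + 1, g.bottom, g.left, g.right⟩
    else if g.dr = 1 then ⟨g.r, g.c - 1, 0, -1, g.top, g.bottom, g.left, g.right - 1⟩
    else if g.dc = -1 then ⟨g.r - 1, g.c, -1, 0, g.top, g.bottom - 1, g.left, g.right⟩
    else ⟨g.r, g.c + 1, 0, 1, g.top, g.bottom, g.left + 1, g.right⟩
  else ⟨g.r + g.dr, g.c + g.dc, g.dr, g.dc, g.top, g.bottom, g.left, g.right⟩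

-- the cells B's walk visits in its first m steps
def pvWalk (g : PvGSt) : Nat → List (List Int)
  | 0 => []
  | m + 1 => [g.r, g.c] :: pvWalk (pvStepGeo g) m

def pvMk (ret : PySem.Dict Int (List Int)) (g : PvGSt) : PvBSt :=
  ⟨ret, g.r, g.c, g.dr, g.dc, g.top, g.bottom, g.left, g.right⟩

theorem pvBStep_bridge (ret : PySem.Dict Int (List Int)) (g : PvGSt) (k : Int) :
    pvBStep (pvMk ret g) k = pvMk (ret.insert k [g.r, g.c]) (pvStepGeo g) := by
  cases g
  simp only [pvBStep, pvStepGeo, pvMk]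
  split_ifs <;> rfl

theorem pvFoldB (m : Nat) : ∀ (c0 : Int) (ret : PySem.Dict Int (List Int)) (g : PvGSt),
    ((PySem.List.pyRange c0 (c0 + (m : Int)) 1).foldl pvBStep (pvMk ret g)).ret =
      pvInsertSeq ret c0 (pvWalk g m) := by
  induction m with
  | zero =>
    intro c0 ret g
    rw [PySem.List.pyRange_one_eq_nil (by omega)]
    simp [pvWalk, pvInsertSeq, pvMk]
  | succ m ih =>
    intro c0 ret g
    rw [PySem.List.pyRange_one_cons (by omega : c0 < c0 + ((m : Nat) + 1 : Nat))]
    simp only [List.foldl_cons, pvBStep_bridge]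
    have hb : c0 + ((m + 1 : Nat) : Int) = (c0 + 1) + (m : Int) := by push_cast; ring
    rw [hb, ih]
    rfl

theorem pvWalk_take (m : Nat) : ∀ (m' : Nat) (g : PvGSt), m' ≤ m →
    pvWalk g m' = (pvWalk g m).take m' := by
  induction m with
  | zero =>
    intro m' g h
    have h0 : m' = 0 := by omega
    subst h0
    simp [pvWalk]
  | succ m ih =>
    intro m' g h
    cases m' with
    | zero => simp [pvWalk]
    | succ m' => simp only [pvWalk, List.take_succ_cons]; rw [ih m' _ (by omega)]

theorem pvWalk_length (m : Nat) : ∀ (g : PvGSt), (pvWalk g m).length = m := by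
  induction m with
  | zero => intro g; rfl
  | succ m ih => intro g; simp [pvWalk, ih]

-- the four straight runs of B's walk, one lemma each
theorem pvRunRight (lim R : Int) (hlR : lim ≤ R) (rest : Nat) :
    ∀ (x : Int), lim ≤ x → x ≤ R →
    pvWalk ⟨lim, x, 0, 1, lim, R, lim, R⟩ ((R - x).toNat + 1 + rest) =
      (PySem.List.pyRange x (R + 1) 1).map (fun t => [lim, t]) ++
        pvWalk ⟨lim + 1, R, 1, 0, lim + 1, R, lim, R⟩ rest := by
  intro x hx1 hx2
  generalize hm : (R - x).toNat = m
  induction m generalizing x with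
  | zero =>
    have hx : R = x := by omega
    subst hx
    have hstep : pvStepGeo ⟨lim, R, 0, 1, lim, R, lim, R⟩ =
        ⟨lim + 1, R, 1, 0, lim + 1, R, lim, R⟩ := by
      simp only [pvStepGeo]
      split_ifs <;> first | (congr 1 <;> omega) | (exfalso; omega)
    rw [show (0 + 1 + rest) = rest + 1 from by omega]
    rw [PySem.List.pyRange_one_cons (by omega : R < R + 1),
      PySem.List.pyRange_one_eq_nil (by omega : (R + 1 : Int) ≤ R + 1)]
    simp [pvWalk, hstep]
  | succ m ih =>
    have hstep : pvStepGeo ⟨lim, x, 0, 1, lim, R, lim, R⟩ =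
        ⟨lim, x + 1, 0, 1, lim, R, lim, R⟩ := by
      simp only [pvStepGeo]
      split_ifs <;> first | (congr 1 <;> omega) | (exfalso; omega)
    rw [show (m + 1 + 1 + rest) = (m + 1 + rest) + 1 from by omega]
    simp only [pvWalk, hstep]
    rw [ih (x + 1) (by omega) (by omega) (by omega),
      PySem.List.pyRange_one_cons (by omega : x < R + 1)]
    simp

theorem pvRunDown (lim R : Int) (hlR : lim + 1 ≤ R) (rest : Nat) :
    ∀ (y : Int), lim + 1 ≤ y → y ≤ R →
    pvWalk ⟨y, R, 1, 0, lim + 1, R, lim, R⟩ ((R - y).toNat + 1 + rest) =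
      (PySem.List.pyRange y (R + 1) 1).map (fun t => [t, R]) ++
        pvWalk ⟨R, R - 1, 0, -1, lim + 1, R, lim, R - 1⟩ rest := by
  intro y hy1 hy2
  generalize hm : (R - y).toNat = m
  induction m generalizing y with
  | zero =>
    have hy : R = y := by omega
    subst hy
    have hstep : pvStepGeo ⟨R, R, 1, 0, lim + 1, R, lim, R⟩ =
        ⟨R, R - 1, 0, -1, lim + 1, R, lim, R - 1⟩ := by
      simp only [pvStepGeo]
      split_ifs <;> first | (congr 1 <;> omega) | (exfalso; omega)
    rw [show (0 + 1 + rest) = rest + 1 from by omega]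
    rw [PySem.List.pyRange_one_cons (by omega : R < R + 1),
      PySem.List.pyRange_one_eq_nil (by omega : (R + 1 : Int) ≤ R + 1)]
    simp [pvWalk, hstep]
  | succ m ih =>
    have hstep : pvStepGeo ⟨y, R, 1, 0, lim + 1, R, lim, R⟩ =
        ⟨y + 1, R, 1, 0, lim + 1, R, lim, R⟩ := by
      simp only [pvStepGeo]
      split_ifs <;> first | (congr 1 <;> omega) | (exfalso; omega)
    rw [show (m + 1 + 1 + rest) = (m + 1 + rest) + 1 from by omega]
    simp only [pvWalk, hstep]
    rw [ih (y + 1) (by omega) (by omega) (by omega),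
      PySem.List.pyRange_one_cons (by omega : y < R + 1)]
    simp

theorem pvRunLeft (lim R : Int) (hlR : lim + 1 ≤ R) (rest : Nat) :
    ∀ (x : Int), lim ≤ x → x ≤ R - 1 →
    pvWalk ⟨R, x, 0, -1, lim + 1, R, lim, R - 1⟩ ((x - lim).toNat + 1 + rest) =
      (PySem.List.pyRange x (lim - 1) (-1)).map (fun t => [R, t]) ++
        pvWalk ⟨R - 1, lim, -1, 0, lim + 1, R - 1, lim, R - 1⟩ rest := by
  intro x hx1 hx2
  generalize hm : (x - lim).toNat = m
  induction m generalizing x with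
  | zero =>
    have hx : lim = x := by omega
    subst hx
    have hstep : pvStepGeo ⟨R, lim, 0, -1, lim + 1, R, lim, R - 1⟩ =
        ⟨R - 1, lim, -1, 0, lim + 1, R - 1, lim, R - 1⟩ := by
      simp only [pvStepGeo]
      split_ifs <;> first | (congr 1 <;> omega) | (exfalso; omega)
    rw [show (0 + 1 + rest) = rest + 1 from by omega]
    rw [PySem.List.pyRange_neg_one_cons (by omega : lim - 1 < lim),
      PySem.List.pyRange_neg_one_eq_nil (by omega : (lim - 1 : Int) ≤ lim - 1)]
    simp [pvWalk, hstep]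
  | succ m ih =>
    have hstep : pvStepGeo ⟨R, x, 0, -1, lim + 1, R, lim, R - 1⟩ =
        ⟨R, x - 1, 0, -1, lim + 1, R, lim, R - 1⟩ := by
      simp only [pvStepGeo]
      split_ifs <;> first | (congr 1 <;> omega) | (exfalso; omega)
    rw [show (m + 1 + 1 + rest) = (m + 1 + rest) + 1 from by omega]
    simp only [pvWalk, hstep]
    rw [ih (x - 1) (by omega) (by omega) (by omega),
      PySem.List.pyRange_neg_one_cons (by omega : lim - 1 < x)]
    simp

theorem pvRunUp (lim R : Int) (hlR : lim + 2 ≤ R) (rest : Nat) :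
    ∀ (y : Int), lim + 1 ≤ y → y ≤ R - 1 →
    pvWalk ⟨y, lim, -1, 0, lim + 1, R - 1, lim, R - 1⟩ ((y - (lim + 1)).toNat + 1 + rest) =
      (PySem.List.pyRange y lim (-1)).map (fun t => [t, lim]) ++
        pvWalk ⟨lim + 1, lim + 1, 0, 1, lim + 1, R - 1, lim + 1, R - 1⟩ rest := by
  intro y hy1 hy2
  generalize hm : (y - (lim + 1)).toNat = m
  induction m generalizing y with
  | zero =>
    have hy : lim + 1 = y := by omega
    subst hy
    have hstep : pvStepGeo ⟨lim + 1, lim, -1, 0, lim + 1, R - 1, lim, R - 1⟩ =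
        ⟨lim + 1, lim + 1, 0, 1, lim + 1, R - 1, lim + 1, R - 1⟩ := by
      simp only [pvStepGeo]
      split_ifs <;> first | (congr 1 <;> omega) | (exfalso; omega)
    rw [show (0 + 1 + rest) = rest + 1 from by omega]
    rw [PySem.List.pyRange_neg_one_cons (by omega : lim < lim + 1),
      PySem.List.pyRange_neg_one_eq_nil (by omega : (lim + 1 - 1 : Int) ≤ lim)]
    simp [pvWalk, hstep]
  | succ m ih =>
    have hstep : pvStepGeo ⟨y, lim, -1, 0, lim + 1, R - 1, lim, R - 1⟩ =
        ⟨y - 1, lim, -1, 0, lim + 1, R - 1, lim, R - 1⟩ := by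
      simp only [pvStepGeo]
      split_ifs <;> first | (congr 1 <;> omega) | (exfalso; omega)
    rw [show (m + 1 + 1 + rest) = (m + 1 + rest) + 1 from by omega]
    simp only [pvWalk, hstep]
    rw [ih (y - 1) (by omega) (by omega) (by omega),
      PySem.List.pyRange_neg_one_cons (by omega : lim < y)]
    simp

-- range(a, b-1, -1) = range(a, b, -1) ++ [b]  (b ≤ a)
theorem pvRangeNegAppend (a b : Int) (h : b ≤ a) :
    PySem.List.pyRange a (b - 1) (-1) = PySem.List.pyRange a b (-1) ++ [b] := by
  generalize hm : (a - b).toNat = m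
  induction m generalizing a with
  | zero =>
    have ha : a = b := by omega
    subst ha
    rw [PySem.List.pyRange_neg_one_cons (by omega : a - 1 < a),
      PySem.List.pyRange_neg_one_eq_nil (by omega : (a - 1 : Int) ≤ a - 1),
      PySem.List.pyRange_neg_one_eq_nil (by omega : (a : Int) ≤ a)]
    rfl
  | succ m ih =>
    rw [PySem.List.pyRange_neg_one_cons (by omega : b - 1 < a),
      PySem.List.pyRange_neg_one_cons (by omega : b < a),
      ih (a - 1) (by omega) (by omega)]
    rfl

-- the one cell A never records: for odd n the center of the grid
def pvTail (n : Int) : List (List Int) :=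
  if n % 2 = 1 then [[(n - 1) / 2, (n - 1) / 2]] else []

-- B's full n*n-step walk from layer lim produces A's remaining rings (plus the center for odd n)
theorem pvWalk_spiral (n : Int) (fuel : Nat) : ∀ (lim : Int),
    0 ≤ lim → 2 * lim + 1 ≤ n → n ≤ 2 * lim + 2 * fuel →
    pvWalk ⟨lim, lim, 0, 1, lim, n - 1 - lim, lim, n - 1 - lim⟩ (((n - 2 * lim) ^ 2).toNat) =
      ((PySem.List.pyRange lim (PySem.Int.floordiv (n + 1) 2) 1).flatMap (pvRing n)) ++
        pvTail n := by
  induction fuel with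
  | zero => intro _ _ _ hf; omega
  | succ fuel ih =>
    intro lim hlim h1 h2
    by_cases hodd : n = 2 * lim + 1
    · -- center cell: one step, ring empty, tail holds the center
      have hs : ((n - 2 * lim) ^ 2).toNat = 1 := by
        have : n - 2 * lim = 1 := by omega
        rw [this]; rfl
      have hm : PySem.Int.floordiv (n + 1) 2 = lim + 1 := by
        rw [PySem.Int.floordiv_eq_iff_of_pos (by omega)]; omega
      rw [hs, hm, PySem.List.pyRange_one_cons (by omega : lim < lim + 1),
        PySem.List.pyRange_one_eq_nil (by omega : (lim + 1 : Int) ≤ lim + 1)]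
      simp only [List.flatMap_cons, List.flatMap_nil, List.append_nil,
        pvRing_empty n lim (by omega), pvWalk, pvTail]
      rw [if_pos (by omega : n % 2 = 1)]
      have e1 : (n - 1) / 2 = lim := by omega
      simp [e1]
    · by_cases heven : n = 2 * lim + 2
      · -- final 2×2 ring: four steps, single remaining ring, no tail
        have hR : n - 1 - lim = lim + 1 := by omega
        have hs : ((n - 2 * lim) ^ 2).toNat =
            ((lim + 1 - lim).toNat + 1) + (((lim + 1 - (lim + 1)).toNat + 1) +
              ((lim + 1 - 1 - lim).toNat + 1 + 0)) := by
          have h2' : n - 2 * lim = 2 := by omega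
          have h22 : ((2:Int)) ^ 2 = 4 := by norm_num
          rw [h2', h22]; omega
        have hm : PySem.Int.floordiv (n + 1) 2 = lim + 1 := by
          rw [PySem.Int.floordiv_eq_iff_of_pos (by omega)]; omega
        rw [hR, hs,
          pvRunRight lim (lim + 1) (by omega) _ lim (by omega) (by omega),
          pvRunDown lim (lim + 1) (by omega) _ (lim + 1) (by omega) (by omega),
          pvRunLeft lim (lim + 1) (by omega) 0 (lim + 1 - 1) (by omega) (by omega),
          hm, PySem.List.pyRange_one_cons (by omega : lim < lim + 1),
          PySem.List.pyRange_one_eq_nil (by omega : (lim + 1 : Int) ≤ lim + 1)]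
        simp only [List.flatMap_cons, List.flatMap_nil, List.append_nil, pvWalk, pvTail]
        rw [if_neg (by omega : ¬ n % 2 = 1)]
        unfold pvRing
        rw [hR,
          PySem.List.pyRange_one_cons (by omega : lim < lim + 1 + 1),
          PySem.List.pyRange_one_cons (by omega : lim + 1 < lim + 1 + 1),
          PySem.List.pyRange_one_eq_nil (by omega : (lim + 1 + 1 : Int) ≤ lim + 1 + 1),
          PySem.List.pyRange_one_cons (by omega : lim < lim + 1),
          PySem.List.pyRange_one_eq_nil (by omega : (lim + 1 : Int) ≤ lim + 1),
          PySem.List.pyRange_neg_one_cons (by omega : lim < lim + 1),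
          PySem.List.pyRange_neg_one_eq_nil (by omega : (lim + 1 - 1 : Int) ≤ lim),
          PySem.List.pyRange_neg_one_cons (by omega : lim - 1 < lim + 1 - 1),
          PySem.List.pyRange_neg_one_eq_nil (by omega : (lim + 1 - 1 - 1 : Int) ≤ lim - 1)]
        simp
      · -- full ring then recurse on the inner square
        have hR : lim + 2 ≤ n - 1 - lim := by omega
        set R := n - 1 - lim with hRdef
        have hs : ((n - 2 * lim) ^ 2).toNat =
            ((R - lim).toNat + 1) + (((R - (lim + 1)).toNat + 1) +
              (((R - 1 - lim).toNat + 1) + (((R - 1 - (lim + 1)).toNat + 1) +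
                ((n - 2 * (lim + 1)) ^ 2).toNat))) := by
          have hkey : (n - 2 * lim) ^ 2 =
              (R - lim + 1) + ((R - lim) + ((R - lim) + ((R - lim - 1) +
                (n - 2 * (lim + 1)) ^ 2))) := by
            rw [hRdef]; ring
          have hp1 : 0 ≤ (n - 2 * lim) ^ 2 := sq_nonneg _
          have hp2 : 0 ≤ (n - 2 * (lim + 1)) ^ 2 := sq_nonneg _
          omega
        rw [hs,
          pvRunRight lim R (by omega) _ lim (by omega) (by omega),
          pvRunDown lim R (by omega) _ (lim + 1) (by omega) (by omega),
          pvRunLeft lim R (by omega) _ (R - 1) (by omega) (by omega),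
          pvRunUp lim R (by omega) _ (R - 1) (by omega) (by omega)]
        have hrec := ih (lim + 1) (by omega) (by omega) (by omega)
        rw [show (n - 1 - (lim + 1) : Int) = R - 1 from by omega] at hrec
        rw [hrec]
        have hm : lim < PySem.Int.floordiv (n + 1) 2 := by
          have := (PySem.Int.le_floordiv_iff_mul_le (a := n + 1) (b := 2) (q := lim + 2)
            (by norm_num)).mpr (by omega)
          omega
        rw [PySem.List.pyRange_one_cons hm, List.flatMap_cons]
        -- regroup B's four runs (corners attached forward) into A's four segments
        unfold pvRing
        rw [← hRdef,
          PySem.List.pyRange_one_succ_right (by omega : lim ≤ R),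
          show (PySem.List.pyRange (lim + 1) (R + 1) 1) =
            PySem.List.pyRange (lim + 1) R 1 ++ [R] from
            PySem.List.pyRange_one_succ_right (by omega : lim + 1 ≤ R),
          show (PySem.List.pyRange lim R 1) = lim :: PySem.List.pyRange (lim + 1) R 1 from
            PySem.List.pyRange_one_cons (by omega : lim < R),
          show (PySem.List.pyRange (R - 1) (lim - 1) (-1)) =
            PySem.List.pyRange (R - 1) lim (-1) ++ [lim] from
            pvRangeNegAppend (R - 1) lim (by omega),
          show (PySem.List.pyRange R lim (-1)) = R :: PySem.List.pyRange (R - 1) lim (-1) from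
            PySem.List.pyRange_neg_one_cons (by omega : lim < R)]
        simp [List.append_assoc]

-- a filter that removes a key larger than every key present is the identity
-- a filter that removes a key larger than every key present is the identity
theorem pvFilterEnum (xs : List (List Int)) : ∀ (s K : Int), s + xs.length ≤ K →
    (PySem.List.enumerate xs s).filter (fun p => !(p.1 == K)) = PySem.List.enumerate xs s := by
  induction xs with
  | nil => intro s K _; simp [PySem.List.enumerate_nil]
  | cons v vs ih =>
    intro s K h
    simp only [List.length_cons] at h
    have hne : s ≠ K := by omega
    have hrec := ih (s + 1) K (by omega)
    simp [PySem.List.enumerate_cons, hne, hrec]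

-- ===== VERDICT (by name: the statement is the Claim_ definition above) =====
theorem getFinalCoords_spec : Claim_equal_getFinalCoords := by
  intro n _
  unfold Spec_getFinalCoords getFinalCoords getFinalCoords_alt
  rw [pvOuter_spec n (n.toNat + 1) 0 1 PySem.Dict.empty le_rfl (by omega) (by omega)]
  have herase : ∀ (d : PySem.Dict Int (List Int)) (K : Int),
      (d.erase K).items = d.items.filter (fun p => !(p.1 == K)) := fun d K => rfl
  by_cases hn : n ≤ 1
  · rw [if_pos hn, pvTail_empty n 0 _ (by omega), herase]
    rfl
  · rw [if_neg hn]
    have hn2 : 2 ≤ n := by omega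
    have hN4 : 4 ≤ n * n := by nlinarith
    set L := (PySem.List.pyRange 0 (PySem.Int.floordiv (n + 1) 2) 1).flatMap (pvRing n) with hL
    have hAitems : (pvInsertSeq PySem.Dict.empty 1 L).items = PySem.List.enumerate L 1 := by
      rw [(pvInsertSeq_items PySem.Dict.empty 1 L (by
        simp [show (PySem.Dict.empty : PySem.Dict Int (List Int)).keys = [] from rfl])).1]
      rfl
    rw [herase, hAitems]
    -- B's side: the fold is an insertion sequence over the walk's cells
    have hrange : (n * n : Int) = 1 + (((n * n - 1).toNat : Nat) : Int) := by omega
    rw [show (⟨PySem.Dict.empty, 0, 0, 0, 1, 0, n - 1, 0, n - 1⟩ : PvBSt) =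
        pvMk PySem.Dict.empty ⟨0, 0, 0, 1, 0, n - 1, 0, n - 1⟩ from rfl]
    conv_rhs => rw [hrange]
    rw [pvFoldB,
      (pvInsertSeq_items PySem.Dict.empty 1 _ (by
        simp [show (PySem.Dict.empty : PySem.Dict Int (List Int)).keys = [] from rfl])).1]
    simp only [show (PySem.Dict.empty : PySem.Dict Int (List Int)).items = [] from rfl,
      List.nil_append]
    -- relate the clipped walk to the full spiral
    have hfull := pvWalk_spiral n (n.toNat + 1) 0 le_rfl (by omega) (by omega)
    rw [show ((n - 2 * 0) ^ 2 : Int) = n * n from by ring,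
      show (n - 1 - 0 : Int) = n - 1 from by omega, ← hL] at hfull
    have hlen : L.length + (pvTail n).length = (n * n).toNat := by
      have hwl := pvWalk_length ((n * n).toNat) ⟨0, 0, 0, 1, 0, n - 1, 0, n - 1⟩
      rw [hfull] at hwl
      simp only [List.length_append] at hwl
      omega
    have htake : pvWalk ⟨0, 0, 0, 1, 0, n - 1, 0, n - 1⟩ ((n * n - 1).toNat) =
        (L ++ pvTail n).take ((n * n - 1).toNat) := by
      rw [← hfull]
      exact pvWalk_take ((n * n).toNat) ((n * n - 1).toNat) _ (by omega)
    rw [htake]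
    by_cases hpar : n % 2 = 1
    · -- odd n: the walk's clipped cell list is exactly A's rings; the absent key n*n filters to nothing
      have htl : (pvTail n).length = 1 := by simp [pvTail, hpar]
      have hLlen : L.length = (n * n - 1).toNat := by omega
      rw [show (L ++ pvTail n).take ((n * n - 1).toNat) = L from by
        rw [← hLlen]; exact List.take_left' rfl]
      exact pvFilterEnum L 1 (n * n) (by rw [hLlen]; omega)
    · -- even n: the walk stops one cell early; the filter drops exactly that last pair (key n*n)
      have htl : pvTail n = [] := by simp [pvTail, hpar]
      rw [htl, List.append_nil]
      have hLlen : L.length = (n * n).toNat := by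
        rw [htl] at hlen; simpa using hlen
      set k := (n * n - 1).toNat with hk
      have hlenTake : (L.take k).length = k := by rw [List.length_take]; omega
      have hdlen : (L.drop k).length = 1 := by rw [List.length_drop]; omega
      obtain ⟨z, hz⟩ := List.length_eq_one_iff.mp hdlen
      conv_lhs => rw [← List.take_append_drop k L]
      rw [PySem.List.enumerate_append, List.filter_append,
        pvFilterEnum (L.take k) 1 (n * n) (by rw [hlenTake]; omega), hz]
      have hkey : ((1 : Int) + ((L.take k).length : Int)) = n * n := by rw [hlenTake]; omega
      rw [hkey]
      simp [PySem.List.enumerate_cons, PySem.List.enumerate_nil]
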